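-- pv_equiv track=rewrite | github.com/mf-sarafyan/namegens | data/multiply_names.py | collect_all_first_names
-- ===== SOURCE A (Python) =====
-- def collect_all_first_names(names_by_sub: dict[str, list[str]], first_name_sub_keys: list[str]) -> list[str]:
--     """Collect all names from the given first-name subcategories, deduplicated."""
--     seen: set[str] = set()
--     for k in first_name_sub_keys:
--         for name in names_by_sub.get(k, []):
--             n = name.strip()
--             if n:
--                 seen.add(n)
--     return sorted(seen)
-- ===== SOURCE B (Python) =====
-- def collect_all_first_names(names_by_sub: dict[str, list[str]], first_name_sub_keys: list[str]) -> list[str]: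
--     """Collect all names from the given first-name subcategories, deduplicated."""
--     collected = [n for k in first_name_sub_keys
--                  for name in names_by_sub.get(k, [])
--                  if (n := name.strip())]
--     collected.sort()
--     out: list[str] = []
--     for x in collected:
--         if not out or out[-1] != x:
--             out.append(x)
--     return out
-- ===== Notes on version B (the rewrite author's own statement) =====
-- stated objective: alternative
-- what changed: Replaces the hash-set dedup followed by a final sort with a plain list collection, a sort, and a single pass that drops adjacent duplicates.
import Mathlib
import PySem

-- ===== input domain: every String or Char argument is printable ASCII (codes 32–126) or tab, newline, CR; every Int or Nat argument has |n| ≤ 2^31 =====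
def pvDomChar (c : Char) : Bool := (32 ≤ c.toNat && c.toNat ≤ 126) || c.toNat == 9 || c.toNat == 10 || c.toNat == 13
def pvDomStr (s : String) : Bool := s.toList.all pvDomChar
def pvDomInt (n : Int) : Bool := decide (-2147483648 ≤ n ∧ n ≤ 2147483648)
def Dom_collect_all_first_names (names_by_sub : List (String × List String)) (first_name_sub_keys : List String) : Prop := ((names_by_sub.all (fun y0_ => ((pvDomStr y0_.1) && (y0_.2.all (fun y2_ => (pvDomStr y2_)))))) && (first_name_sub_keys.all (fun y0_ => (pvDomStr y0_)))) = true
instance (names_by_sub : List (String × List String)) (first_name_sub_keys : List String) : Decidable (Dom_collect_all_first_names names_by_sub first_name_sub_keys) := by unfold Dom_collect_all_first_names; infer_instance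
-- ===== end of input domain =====

-- B replaces A's hash-set dedup + final sort by collect-into-a-list, sort, then one pass
-- dropping adjacent duplicates (objective: alternative decomposition, same cost).

-- ===== PORT A =====

-- names_by_sub.get(k, []) on the association list (first match)
def pvLookup (names_by_sub : List (String × List String)) (k : String) : List String :=
  ((names_by_sub.find? (fun p => p.1 == k)).map Prod.snd).getD []

def collect_all_first_names (names_by_sub : List (String × List String)) (first_name_sub_keys : List String) : List String :=
  let seen : PySem.Set String :=
    first_name_sub_keys.foldl
      (fun seen k =>
        (pvLookup names_by_sub k).foldl
          (fun s name =>
            let n := PySem.Str.strip name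
            if n ≠ "" then PySem.Set.add s n else s)
          seen)
      PySem.Set.empty
  PySem.List.sorted seen (fun x => x) false

-- ===== PORT B =====

-- one step of B's final loop: append x unless it equals the last kept element
def pvKeepStep (out : List String) (x : String) : List String :=
  if out = [] ∨ out.getLast? ≠ some x then out ++ [x] else out

def collect_all_first_names_alt (names_by_sub : List (String × List String)) (first_name_sub_keys : List String) : List String :=
  let collected :=
    first_name_sub_keys.flatMap
      (fun k => ((pvLookup names_by_sub k).map PySem.Str.strip).filter (fun n => n ≠ ""))
  let sortedCollected := PySem.List.sorted collected (fun x => x) false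
  sortedCollected.foldl pvKeepStep []

-- ===== PRECONDITION & SPEC =====
def Spec_collect_all_first_names (names_by_sub : List (String × List String)) (first_name_sub_keys : List String) (out : List String) : Prop := out = collect_all_first_names_alt names_by_sub first_name_sub_keys
instance (names_by_sub : List (String × List String)) (first_name_sub_keys : List String) (out : List String) : Decidable (Spec_collect_all_first_names names_by_sub first_name_sub_keys out) := by unfold Spec_collect_all_first_names; infer_instance

-- ===== CLAIM (what is proved, stated in full; the proofs are below) =====
def Claim_equal_collect_all_first_names : Prop := ∀ (names_by_sub : List (String × List String)) (first_name_sub_keys : List String), Dom_collect_all_first_names names_by_sub first_name_sub_keys → Spec_collect_all_first_names names_by_sub first_name_sub_keys (collect_all_first_names names_by_sub first_name_sub_keys)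

-- ===== LEMMAS AND PROOFS =====

-- A's inner loop over one subcategory equals folding Set.add over B's stripped-and-filtered list
theorem pv_inner_fold (vals : List String) (s : PySem.Set String) :
    vals.foldl
      (fun s name =>
        let n := PySem.Str.strip name
        if n ≠ "" then PySem.Set.add s n else s) s
    = ((vals.map PySem.Str.strip).filter (fun n => n ≠ "")).foldl PySem.Set.add s := by
  induction vals generalizing s with
  | nil => rfl
  | cons v vs ih =>
    rw [List.foldl_cons, ih, List.map_cons, List.filter_cons]
    by_cases h : PySem.Str.strip v = ""
    · simp [h]
    · simp [h]

-- A's seen-set equals set(collected) for B's collected list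
theorem pv_seen_eq (names_by_sub : List (String × List String)) (keys : List String) (s : PySem.Set String) :
    keys.foldl
      (fun seen k =>
        (pvLookup names_by_sub k).foldl
          (fun s name =>
            let n := PySem.Str.strip name
            if n ≠ "" then PySem.Set.add s n else s)
          seen) s
    = (keys.flatMap
        (fun k => ((pvLookup names_by_sub k).map PySem.Str.strip).filter (fun n => n ≠ ""))).foldl
        PySem.Set.add s := by
  induction keys generalizing s with
  | nil => rfl
  | cons k ks ih =>
    simp only [List.foldl_cons, List.flatMap_cons, List.foldl_append]
    rw [pv_inner_fold, ih]

-- membership through B's adjacent-duplicate-dropping fold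
theorem pv_mem_keep (l out : List String) (a : String) :
    a ∈ l.foldl pvKeepStep out ↔ a ∈ out ∨ a ∈ l := by
  induction l generalizing out with
  | nil => simp
  | cons x xs ih =>
    simp only [List.foldl_cons, ih, pvKeepStep]
    split_ifs with h
    · simp [or_assoc]
    · push_neg at h
      obtain ⟨hne, hlast⟩ := h
      have hx : x ∈ out := List.mem_of_getLast? hlast
      simp only [List.mem_cons]
      constructor
      · rintro (h | h)
        · exact Or.inl h
        · exact Or.inr (Or.inr h)
      · rintro (h | h | h)
        · exact Or.inl h
        · subst h; exact Or.inl hx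
        · exact Or.inr h

-- B's fold output is strictly increasing, given a sorted input chained after the accumulator
theorem pv_pairwise_keep (l : List String) (out : List String)
    (hout : out.Pairwise (· < ·))
    (hl : l.Pairwise (· ≤ ·))
    (hchain : ∀ m, out.getLast? = some m → ∀ y ∈ l, m ≤ y) :
    (l.foldl pvKeepStep out).Pairwise (· < ·) := by
  induction l generalizing out with
  | nil => simpa only [List.foldl_nil] using hout
  | cons x xs ih =>
    simp only [List.foldl_cons]
    have hxle : ∀ y ∈ xs, x ≤ y := (List.pairwise_cons.mp hl).1
    have hxs := (List.pairwise_cons.mp hl).2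
    unfold pvKeepStep
    split_ifs with h
    · refine ih (out ++ [x]) ?_ hxs ?_
      · rcases List.eq_nil_or_concat out with rfl | ⟨ys, m, rfl⟩
        · simp
        · simp only [List.concat_eq_append] at hout hchain h ⊢
          have hlastm : (ys ++ [m]).getLast? = some m := List.getLast?_concat
          have hle : m ≤ x := hchain m hlastm x List.mem_cons_self
          have hne : (ys ++ [m]).getLast? ≠ some x := by
            rcases h with h | h
            · exact absurd h (by simp)
            · exact h
          have hlt : m < x := lt_of_le_of_ne hle (fun e => hne (by rw [hlastm, e]))
          refine List.pairwise_append.mpr ⟨hout, List.pairwise_singleton _ _, ?_⟩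
          intro a ha b hb
          obtain rfl := List.mem_singleton.mp hb
          rcases List.mem_append.mp ha with ha' | ha'
          · exact lt_trans ((List.pairwise_append.mp hout).2.2 a ha' m (List.mem_singleton_self m)) hlt
          · obtain rfl := List.mem_singleton.mp ha'
            exact hlt
      · intro m hm y hy
        obtain rfl : m = x := (Option.some.inj ((List.getLast?_concat (l := out)).symm.trans hm)).symm
        exact hxle y hy
    · push_neg at h
      obtain ⟨hne, hlast⟩ := h
      refine ih out hout hxs ?_
      intro m hm y hy
      obtain rfl : m = x := Option.some.inj (hm.symm.trans hlast)
      exact hxle y hy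

-- sorted(set(xs)) equals the adjacent-dedup of sorted(xs)
theorem pv_sorted_set_eq_dedup_sorted (xs : List String) :
    PySem.List.sorted (PySem.Set.ofList xs) (fun x => x) false
    = (PySem.List.sorted xs (fun x => x) false).foldl pvKeepStep [] := by
  have hsortp : (PySem.List.sorted xs (fun x => x) false).Pairwise (· ≤ ·) :=
    PySem.List.sorted_pairwise (xs := xs) (key := fun x => x)
  set B := (PySem.List.sorted xs (fun x => x) false).foldl pvKeepStep [] with hB
  have hBpair : B.Pairwise (· < ·) :=
    pv_pairwise_keep _ [] (by simp) hsortp (by simp)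
  have hperm : B.Perm (PySem.Set.ofList xs) := by
    refine (List.perm_ext_iff_of_nodup hBpair.nodup (PySem.Set.nodup_ofList xs)).mpr ?_
    intro a
    rw [hB, pv_mem_keep]
    simp [PySem.List.mem_sorted, PySem.Set.mem_ofList]
  exact PySem.List.sorted_eq_of_perm_of_pairwise_lt _ _ _ hperm hBpair

-- ===== VERDICT (by name: the statement is the Claim_ definition above) =====
theorem collect_all_first_names_spec : Claim_equal_collect_all_first_names := by
  intro names_by_sub keys _
  show collect_all_first_names names_by_sub keys = collect_all_first_names_alt names_by_sub keys
  unfold collect_all_first_names collect_all_first_names_alt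
  rw [pv_seen_eq]
  exact pv_sorted_set_eq_dedup_sorted _
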